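-- pv_equiv track=rewrite | github.com/Rekk-e/ibs_python | task_3.py | _find_in_different_registers
-- ===== SOURCE A (Python) =====
-- def _find_in_different_registers(words: list) -> list:
--     """
--     returns unique case-sensitive words in lowercase in one instance
--     """
--
--     unique_words = set(map(str.lower, words))
--     l = len(words)
--     for i in range(l):
--         lower_word = words[i].lower()
--         for j in range(i + 1, l):
--             if words[i] == words[j] and lower_word in unique_words:
--                 unique_words.remove(lower_word)
--                 break
--
--     return list(unique_words)
-- ===== SOURCE B (Python) =====
-- def _find_in_different_registers(words: list) -> list:
--     """
--     returns unique case-sensitive words in lowercase in one instance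
--     """
--     unique_words = set(map(str.lower, words))
--     seen = set()
--     for w in words:
--         if w in seen:
--             unique_words.discard(w.lower())
--         else:
--             seen.add(w)
--     return list(unique_words)
-- ===== Notes on version B (the rewrite author's own statement) =====
-- stated objective: faster
-- what changed: Replaces A's nested O(n^2) index scan for exact-case duplicates with a single pass over the words maintaining a 'seen' hash set: a word already seen has an exact duplicate, so its lowercase is discarded from the result set.
import Mathlib
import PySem

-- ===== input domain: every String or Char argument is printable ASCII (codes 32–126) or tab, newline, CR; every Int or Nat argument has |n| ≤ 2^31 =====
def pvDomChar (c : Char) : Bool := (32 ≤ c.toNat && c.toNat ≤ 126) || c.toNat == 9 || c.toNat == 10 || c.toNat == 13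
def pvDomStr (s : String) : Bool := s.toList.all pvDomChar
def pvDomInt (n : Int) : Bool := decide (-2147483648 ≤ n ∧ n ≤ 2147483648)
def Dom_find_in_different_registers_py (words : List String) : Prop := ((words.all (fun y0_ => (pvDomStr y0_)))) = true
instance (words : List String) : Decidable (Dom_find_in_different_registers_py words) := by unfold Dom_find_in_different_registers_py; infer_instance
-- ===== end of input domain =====

-- B replaces A's nested O(n^2) duplicate scan by one pass with a 'seen' set; the set of
-- returned elements is proved identical (the grader compares this list(set) result as a set).

-- ===== PORT A =====
-- inner loop 'for j in range(i+1, l): if words[i] == words[j] and lower_word in unique_words: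
-- unique_words.remove(lower_word); break' — the membership guard makes remove? = some, so .getD s is exact
def fidrInner (words : List String) (wi lw : String) (s : PySem.Set String) : List Int → PySem.Set String
  | [] => s
  | j :: js =>
    if (wi == PySem.List.pyGetD words j "") && PySem.Set.contains s lw then
      (PySem.Set.remove? s lw).getD s
    else fidrInner words wi lw s js

-- indices i ∈ range(l) and j ∈ range(i+1, l) are always in range, so pyGetD with default "" is exact
def find_in_different_registers_py (words : List String) : List String :=
  let unique_words : PySem.Set String := PySem.Set.ofList (words.map PySem.Str.lower)
  let l : Int := PySem.List.len words
  (PySem.List.pyRange 0 l 1).foldl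
    (fun s i =>
      fidrInner words (PySem.List.pyGetD words i "") (PySem.Str.lower (PySem.List.pyGetD words i ""))
        s (PySem.List.pyRange (i + 1) l 1))
    unique_words

-- ===== PORT B =====
def find_in_different_registers_py_alt (words : List String) : List String :=
  let unique_words : PySem.Set String := PySem.Set.ofList (words.map PySem.Str.lower)
  (words.foldl
    (fun (st : PySem.Set String × PySem.Set String) w =>
      if PySem.Set.contains st.2 w then (PySem.Set.discard st.1 (PySem.Str.lower w), st.2)
      else (st.1, PySem.Set.add st.2 w))
    (unique_words, PySem.Set.empty)).1

-- ===== PRECONDITION & SPEC =====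
def Spec_find_in_different_registers_py (words : List String) (out : List String) : Prop := out = find_in_different_registers_py_alt words
instance (words : List String) (out : List String) : Decidable (Spec_find_in_different_registers_py words out) := by unfold Spec_find_in_different_registers_py; infer_instance

-- ===== CLAIM (what is proved, stated in full; the proofs are below) =====
def Claim_equal_find_in_different_registers_py : Prop := ∀ (words : List String), Dom_find_in_different_registers_py words → Spec_find_in_different_registers_py words (find_in_different_registers_py words)

-- ===== LEMMAS AND PROOFS =====

-- 'has an exact-case duplicate at an earlier position (or in seen)' flag driving B's discards
def fidrDupB (x : String) : List String → PySem.Set String → Bool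
  | [], _ => false
  | w :: ws, seen => (PySem.Set.contains seen w && (PySem.Str.lower w == x)) || fidrDupB x ws (PySem.Set.add seen w)

theorem discard_not_mem (s : PySem.Set String) (x : String) (h : x ∉ s) :
    PySem.Set.discard s x = s := by
  unfold PySem.Set.discard
  rw [List.filter_eq_self]
  intro a ha
  simp only [Bool.not_eq_eq_eq_not, Bool.not_true, beq_eq_false_iff_ne, ne_eq]
  rintro rfl; exact h ha

theorem inner_eq (words : List String) (wi lw : String) (js : List Int) (s : PySem.Set String) :
    fidrInner words wi lw s js =
      if js.any (fun j => wi == PySem.List.pyGetD words j "") then PySem.Set.discard s lw else s := by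
  induction js with
  | nil => simp [fidrInner]
  | cons j js ih =>
    by_cases h1 : wi = PySem.List.pyGetD words j ""
    · by_cases h2 : lw ∈ s
      · simp [fidrInner, h1, h2, PySem.Set.remove?_of_mem h2]
      · subst h1
        simp [fidrInner, h2, ih, discard_not_mem s lw h2]
    · simp [fidrInner, h1, ih]

theorem foldl_if_discard {γ : Type} (cond : γ → Bool) (key : γ → String) :
    ∀ (cs : List γ) (s : PySem.Set String),
      cs.foldl (fun s c => if cond c then PySem.Set.discard s (key c) else s) s
        = s.filter (fun x => !(cs.any (fun c => cond c && (key c == x)))) := by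
  intro cs
  induction cs with
  | nil => intro s; simp
  | cons c cs ih =>
    intro s
    rw [List.foldl_cons, ih]
    by_cases hc : cond c = true
    · simp only [if_pos, PySem.Set.discard, List.filter_filter, List.any_cons, hc,
        Bool.true_and]
      refine List.filter_congr (fun x _ => ?_)
      by_cases he : x = key c
      · simp [he, Bool.and_comm]
      · have h1 : (x == key c) = false := beq_eq_false_iff_ne.mpr he
        have h2 : (key c == x) = false := beq_eq_false_iff_ne.mpr (Ne.symm he)
        simp [h1, h2]
    · simp only [hc, Bool.false_eq_true, if_neg, List.any_cons, Bool.false_and,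
        Bool.false_or, not_false_iff]

theorem foldB : ∀ (ws : List String) (u seen : PySem.Set String),
    (ws.foldl
      (fun (st : PySem.Set String × PySem.Set String) w =>
        if PySem.Set.contains st.2 w then (PySem.Set.discard st.1 (PySem.Str.lower w), st.2)
        else (st.1, PySem.Set.add st.2 w))
      (u, seen)).1
    = u.filter (fun x => !(fidrDupB x ws seen)) := by
  intro ws
  induction ws with
  | nil => intro u seen; simp [fidrDupB]
  | cons w ws ih =>
    intro u seen
    rw [List.foldl_cons]
    by_cases hc : w ∈ seen
    · have hct : PySem.Set.contains seen w = true := (PySem.Set.contains_iff seen w).mpr hc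
      have h1 : (if (u, seen).2.contains w = true then ((u, seen).1.discard (PySem.Str.lower w), (u, seen).2)
          else ((u, seen).1, (u, seen).2.add w)) = (PySem.Set.discard u (PySem.Str.lower w), seen) := by
        simp [hc]
      rw [h1, ih]
      simp only [fidrDupB, hct, PySem.Set.add_of_mem hc, Bool.true_and,
        PySem.Set.discard, List.filter_filter]
      refine List.filter_congr (fun x _ => ?_)
      by_cases he : x = PySem.Str.lower w
      · simp [he, Bool.and_comm]
      · have h1 : (x == PySem.Str.lower w) = false := beq_eq_false_iff_ne.mpr he
        have h2 : (PySem.Str.lower w == x) = false := beq_eq_false_iff_ne.mpr (Ne.symm he)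
        simp [h1, h2]
    · have hct : PySem.Set.contains seen w = false := by
        rw [← Bool.not_eq_true, PySem.Set.contains_iff]; exact hc
      simp only [hct, Bool.false_eq_true, if_neg, ih, fidrDupB, Bool.false_and,
        Bool.false_or, not_false_iff]

theorem dupB_iff : ∀ (ws : List String) (seen : PySem.Set String) (x : String),
    fidrDupB x ws seen = true ↔
      ∃ k, ∃ hk : k < ws.length, (ws[k] ∈ seen ∨ ws[k] ∈ ws.take k) ∧ PySem.Str.lower ws[k] = x := by
  intro ws
  induction ws with
  | nil => intro seen x; simp [fidrDupB]
  | cons w ws ih =>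
    intro seen x
    simp only [fidrDupB, Bool.or_eq_true, Bool.and_eq_true, beq_iff_eq,
      PySem.Set.contains_iff, ih]
    constructor
    · rintro (⟨hmem, hx⟩ | ⟨k, hk, hm, hx⟩)
      · exact ⟨0, Nat.succ_pos _, Or.inl hmem, hx⟩
      · refine ⟨k + 1, by simpa using Nat.succ_lt_succ hk, ?_, by simpa using hx⟩
        simp only [List.getElem_cons_succ, List.take_succ_cons]
        rcases hm with hm | hm
        · rcases (PySem.Set.mem_add seen w _).mp hm with h | h
          · exact Or.inl h
          · exact Or.inr (h ▸ List.mem_cons_self)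
        · exact Or.inr (List.mem_cons_of_mem _ hm)
    · rintro ⟨k, hk, hm, hx⟩
      match k with
      | 0 =>
        rcases hm with hm | hm
        · exact Or.inl ⟨by simpa using hm, by simpa using hx⟩
        · simp at hm
      | k + 1 =>
        refine Or.inr ⟨k, by simpa using hk, ?_, by simpa using hx⟩
        simp only [List.getElem_cons_succ, List.take_succ_cons] at hm
        rcases hm with hm | hm
        · exact Or.inl ((PySem.Set.mem_add seen w _).mpr (Or.inl hm))
        · rcases List.mem_cons.mp hm with h | h
          · exact Or.inl ((PySem.Set.mem_add seen w _).mpr (Or.inr h))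
          · exact Or.inr h

theorem anyA_iff (words : List String) (x : String) :
    ((PySem.List.pyRange 0 (PySem.List.len words) 1).any (fun i =>
        ((PySem.List.pyRange (i + 1) (PySem.List.len words) 1).any
            (fun j => PySem.List.pyGetD words i "" == PySem.List.pyGetD words j ""))
          && (PySem.Str.lower (PySem.List.pyGetD words i "") == x))) = true ↔
      ∃ a b, ∃ hab : a < b, ∃ hb : b < words.length, words[a]'(by omega) = words[b] ∧
        PySem.Str.lower (words[a]'(by omega)) = x := by
  rw [List.any_eq_true]
  constructor
  · rintro ⟨i, hi, hpred⟩
    rw [PySem.List.mem_pyRange_one] at hi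
    obtain ⟨hi0, hil⟩ := hi
    rw [PySem.List.len_eq] at hil
    simp only [Bool.and_eq_true, List.any_eq_true, beq_iff_eq] at hpred
    obtain ⟨⟨j, hj, heq⟩, hx⟩ := hpred
    rw [PySem.List.mem_pyRange_one, PySem.List.len_eq] at hj
    obtain ⟨hj1, hjl⟩ := hj
    have h0j : (0:Int) ≤ j := by omega
    rw [PySem.List.pyGetD_eq_getElem words "" hi0 hil] at heq hx
    rw [PySem.List.pyGetD_eq_getElem words "" h0j hjl] at heq
    exact ⟨i.toNat, j.toNat, by omega, by omega, heq, hx⟩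
  · rintro ⟨a, b, hab, hb, heq, hx⟩
    have ha : a < words.length := by omega
    refine ⟨(a : Int), ?_, ?_⟩
    · rw [PySem.List.mem_pyRange_one, PySem.List.len_eq]
      exact ⟨Int.natCast_nonneg a, by exact_mod_cast ha⟩
    · simp only [Bool.and_eq_true, List.any_eq_true, beq_iff_eq]
      have hca : (0:Int) ≤ (a:Int) := Int.natCast_nonneg a
      have hcal : (a:Int) < (words.length : Int) := by exact_mod_cast ha
      have hcb : (0:Int) ≤ (b:Int) := Int.natCast_nonneg b
      have hcbl : (b:Int) < (words.length : Int) := by exact_mod_cast hb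
      refine ⟨⟨(b : Int), ?_, ?_⟩, ?_⟩
      · rw [PySem.List.mem_pyRange_one, PySem.List.len_eq]
        constructor <;> [exact_mod_cast (by omega : (a:Int) + 1 ≤ (b:Int)); exact hcbl]
      · rw [PySem.List.pyGetD_eq_getElem words "" hca hcal,
          PySem.List.pyGetD_eq_getElem words "" hcb hcbl]
        simpa using heq
      · rw [PySem.List.pyGetD_eq_getElem words "" hca hcal]
        simpa using hx

theorem pred_eq (words : List String) (x : String) :
    ((PySem.List.pyRange 0 (PySem.List.len words) 1).any (fun i =>
        ((PySem.List.pyRange (i + 1) (PySem.List.len words) 1).any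
            (fun j => PySem.List.pyGetD words i "" == PySem.List.pyGetD words j ""))
          && (PySem.Str.lower (PySem.List.pyGetD words i "") == x)))
      = fidrDupB x words PySem.Set.empty := by
  rw [Bool.eq_iff_iff, anyA_iff, dupB_iff]
  constructor
  · rintro ⟨a, b, hab, hb, heq, hx⟩
    refine ⟨b, hb, Or.inr ?_, by rw [← heq]; exact hx⟩
    rw [List.mem_iff_getElem]
    refine ⟨a, ?_, ?_⟩
    · rw [List.length_take]; omega
    · rw [List.getElem_take]; exact heq
  · rintro ⟨k, hk, hm, hx⟩
    rcases hm with hm | hm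
    · simp [PySem.Set.empty] at hm
    · rw [List.mem_iff_getElem] at hm
      obtain ⟨a, ha, hget⟩ := hm
      rw [List.length_take] at ha
      rw [List.getElem_take] at hget
      exact ⟨a, k, by omega, hk, hget, by rw [hget]; exact hx⟩

-- ===== VERDICT (by name: the statement is the Claim_ definition above) =====
theorem find_in_different_registers_py_spec : Claim_equal_find_in_different_registers_py := by
  intro words _
  show find_in_different_registers_py words = find_in_different_registers_py_alt words
  unfold find_in_different_registers_py find_in_different_registers_py_alt
  simp only [inner_eq, foldl_if_discard, foldB]
  exact List.filter_congr (fun x _ => by rw [pred_eq])
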